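-- pv_equiv track=rewrite | github.com/owenlikecoding/weirdlaungaugetranslator | run on device/untranslate.py | revert_grammar
-- ===== SOURCE A (Python) =====
-- grammar_suffixes = ['ey', 'et', 'ud', 'oge', 'eis']
--
-- def revert_grammar(words):
--     reverted_words = []
--     for word in words:
--         for suffix in grammar_suffixes:
--             if word.endswith(suffix):
--                 word = word[:-len(suffix)]
--                 break
--         reverted_words.append(word)
--     return reverted_words
-- ===== SOURCE B (Python) =====
-- _SUFFIX_BY_LAST = {'y': 'ey', 't': 'et', 'd': 'ud', 'e': 'oge', 's': 'eis'}
--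
-- def revert_grammar(words):
--     result = []
--     for word in words:
--         suffix = _SUFFIX_BY_LAST.get(word[-1:])
--         if suffix is not None and word.endswith(suffix):
--             word = word[:-len(suffix)]
--         result.append(word)
--     return result
-- ===== Notes on version B (the rewrite author's own statement) =====
-- stated objective: faster
-- what changed: Replaces A's ordered scan over all five suffixes per word (endswith each, break on first hit) with a dictionary keyed by the suffixes' distinct last letters: one lookup on word[-1:] selects the single candidate suffix, so at most one endswith test runs per word.
import Mathlib
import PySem

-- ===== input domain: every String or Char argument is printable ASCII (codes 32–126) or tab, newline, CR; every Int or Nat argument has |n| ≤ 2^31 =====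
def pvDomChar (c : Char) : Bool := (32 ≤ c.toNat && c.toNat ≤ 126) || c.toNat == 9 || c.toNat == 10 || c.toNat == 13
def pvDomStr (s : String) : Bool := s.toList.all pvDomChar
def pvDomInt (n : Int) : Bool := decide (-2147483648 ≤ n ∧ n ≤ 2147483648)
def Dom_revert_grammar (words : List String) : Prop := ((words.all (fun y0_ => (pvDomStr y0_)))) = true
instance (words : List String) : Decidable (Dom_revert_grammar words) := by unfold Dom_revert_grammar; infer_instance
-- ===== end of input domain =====

-- B replaces A's per-suffix scan with a dictionary dispatch on the word's last character
-- (the five suffixes end in five distinct letters), checking at most one suffix per word (objective: alternative).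

-- ===== PORT A =====
def pvSuffixes : List String := ["ey", "et", "ud", "oge", "eis"]

-- inner 'for suffix in grammar_suffixes: if word.endswith(suffix): word = word[:-len(suffix)]; break'
def pvStripA : List String → String → String
  | [], w => w
  | s :: rest, w =>
    if PySem.Str.endswith w s then PySem.Str.slice w none (some (-(PySem.Str.len s : Int)))
    else pvStripA rest w

def revert_grammar (words : List String) : List String :=
  words.foldl (fun acc word => acc ++ [pvStripA pvSuffixes word]) []

-- ===== PORT B =====
def pvSuffixByLast : PySem.Dict String String :=
  PySem.Dict.ofList [("y","ey"),("t","et"),("d","ud"),("e","oge"),("s","eis")]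

-- 'suffix = _SUFFIX_BY_LAST.get(word[-1:]); if suffix is not None and word.endswith(suffix): …'
def pvStripB (word : String) : String :=
  match pvSuffixByLast.get? (PySem.Str.slice word (some (-1)) none) with
  | some suffix =>
    if PySem.Str.endswith word suffix then PySem.Str.slice word none (some (-(PySem.Str.len suffix : Int)))
    else word
  | none => word

def revert_grammar_alt (words : List String) : List String :=
  words.foldl (fun acc word => acc ++ [pvStripB word]) []

-- ===== PRECONDITION & SPEC =====
def Spec_revert_grammar (words : List String) (out : List String) : Prop := out = revert_grammar_alt words
instance (words : List String) (out : List String) : Decidable (Spec_revert_grammar words out) := by unfold Spec_revert_grammar; infer_instance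

-- ===== CLAIM (what is proved, stated in full; the proofs are below) =====
def Claim_equal_revert_grammar : Prop := ∀ (words : List String), Dom_revert_grammar words → Spec_revert_grammar words (revert_grammar words)

-- ===== LEMMAS AND PROOFS =====
theorem suffix_concat_iff (p t : List Char) (a c : Char) :
    (p ++ [a] <:+ t ++ [c]) ↔ (a = c ∧ p <:+ t) := by
  constructor
  · rintro ⟨u, hu⟩
    have hlast := congrArg List.getLast? hu
    simp at hlast
    subst hlast
    refine ⟨rfl, u, ?_⟩
    have hdl := congrArg List.dropLast hu
    simpa using hdl
  · rintro ⟨rfl, u, rfl⟩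
    exact ⟨u, by simp⟩

theorem get?_tab (k : String) : pvSuffixByLast.get? k =
    if k = "y" then some "ey" else if k = "t" then some "et" else if k = "d" then some "ud"
    else if k = "e" then some "oge" else if k = "s" then some "eis" else none := by
  have h : pvSuffixByLast = PySem.Dict.mk [("y","ey"),("t","et"),("d","ud"),("e","oge"),("s","eis")] := by decide
  rw [h]
  rw [PySem.Dict.get?_mk_cons, PySem.Dict.get?_mk_cons, PySem.Dict.get?_mk_cons,
      PySem.Dict.get?_mk_cons, PySem.Dict.get?_mk_cons]
  simp only [beq_iff_eq, PySem.Dict.get?]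
  by_cases h1 : k = "y" <;> by_cases h2 : k = "t" <;> by_cases h3 : k = "d" <;>
    by_cases h4 : k = "e" <;> by_cases h5 : k = "s" <;> simp_all [eq_comm]

theorem endswith_concat (t : List Char) (c : Char) (p : List Char) (a : Char) :
    PySem.Chars.endswith (t ++ [c]) (p ++ [a]) = (decide (a = c) && decide (p <:+ t)) := by
  rcases hb : PySem.Chars.endswith (t ++ [c]) (p ++ [a]) with _ | _
  · rw [eq_comm, Bool.and_eq_false_iff]
    rw [Bool.eq_false_iff] at hb
    by_contra hcon
    rw [not_or] at hcon
    apply hb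
    rw [PySem.Chars.endswith_iff, suffix_concat_iff]
    simp at hcon
    exact ⟨of_decide_eq_true (by simpa using hcon.1), of_decide_eq_true (by simpa using hcon.2)⟩
  · rw [PySem.Chars.endswith_iff, suffix_concat_iff] at hb
    simp [hb.1, hb.2]

theorem key_toList (w : String) (t : List Char) (c : Char) (hw : w.toList = t ++ [c]) :
    (PySem.Str.slice w (some (-1)) none).toList = [c] := by
  simp [PySem.Str.slice, PySem.List.slice_from_neg_one, hw]

theorem strip_eq (w : String) : pvStripA pvSuffixes w = pvStripB w := by
  rcases List.eq_nil_or_concat w.toList with hnil | ⟨t, c, hw⟩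
  all_goals try simp only [List.concat_eq_append] at hw
  · have : w = "" := by
      have h := (String.ofList_eq (l := w.toList) (s := w)).mpr rfl
      rw [hnil] at h; exact h.symm
    subst this; decide
  · have hkey : (PySem.Str.slice w (some (-1)) none) = String.ofList [c] := by
      have h := key_toList w t c hw
      exact ((String.ofList_eq (l := [c]) (s := PySem.Str.slice w (some (-1)) none)).mpr h.symm).symm
    unfold pvStripB
    rw [hkey, get?_tab]
    have ey : PySem.Chars.endswith (t ++ [c]) ['e','y'] = (decide ('y' = c) && decide (['e'] <:+ t)) := endswith_concat t c ['e'] 'y'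
    have et : PySem.Chars.endswith (t ++ [c]) ['e','t'] = (decide ('t' = c) && decide (['e'] <:+ t)) := endswith_concat t c ['e'] 't'
    have ud : PySem.Chars.endswith (t ++ [c]) ['u','d'] = (decide ('d' = c) && decide (['u'] <:+ t)) := endswith_concat t c ['u'] 'd'
    have oge : PySem.Chars.endswith (t ++ [c]) ['o','g','e'] = (decide ('e' = c) && decide (['o','g'] <:+ t)) := endswith_concat t c ['o','g'] 'e'
    have eis : PySem.Chars.endswith (t ++ [c]) ['e','i','s'] = (decide ('s' = c) && decide (['e','i'] <:+ t)) := endswith_concat t c ['e','i'] 's'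
    simp only [pvStripA, pvSuffixes]
    by_cases h1 : c = 'y'
    · subst h1; simp_all
    · by_cases h2 : c = 't'
      · subst h2; simp_all
      · by_cases h3 : c = 'd'
        · subst h3; simp_all
        · by_cases h4 : c = 'e'
          · subst h4; simp_all
          · by_cases h5 : c = 's'
            · subst h5; simp_all
            · have ky : String.ofList [c] ≠ "y" := by simpa [String.ofList_eq] using h1
              have kt : String.ofList [c] ≠ "t" := by simpa [String.ofList_eq] using h2
              have kd : String.ofList [c] ≠ "d" := by simpa [String.ofList_eq] using h3
              have ke : String.ofList [c] ≠ "e" := by simpa [String.ofList_eq] using h4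
              have ks : String.ofList [c] ≠ "s" := by simpa [String.ofList_eq] using h5
              simp [hw, ey, et, ud, oge, eis, ky, kt, kd, ke, ks,
                    Ne.symm h1, Ne.symm h2, Ne.symm h3, Ne.symm h4, Ne.symm h5]

-- ===== VERDICT (by name: the statement is the Claim_ definition above) =====
theorem revert_grammar_spec : Claim_equal_revert_grammar := by
  intro words _
  unfold Spec_revert_grammar revert_grammar revert_grammar_alt
  rw [PySem.List.foldl_append_singleton_eq_map, PySem.List.foldl_append_singleton_eq_map]
  exact List.map_congr_left (fun w _ => strip_eq w)
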